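-- pv_equiv track=rewrite | github.com/wedkarz02/krypto_ug | stegano/stegano.py | extract_message_from_double_spaces
-- ===== SOURCE A (Python) =====
-- def extract_message_from_double_spaces(content):
--     bits = []
--     i = 0
--     while i < len(content):
--         if content[i] == ' ' and (i + 1 >= len(content) or content[i + 1] != ' '):
--             bits.append('0')
--             i += 1
--         elif content[i:i+2] == '  ':
--             bits.append('1')
--             i += 2
--         else:
--             i += 1
--
--     return ''.join(bits)
-- ===== SOURCE B (Python) =====
-- def extract_message_from_double_spaces(content):
--     pieces = []
--     run = 0
--     for ch in content:
--         if ch == ' ':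
--             run += 1
--         else:
--             if run:
--                 pieces.append('1' * (run // 2) + '0' * (run % 2))
--                 run = 0
--     if run:
--         pieces.append('1' * (run // 2) + '0' * (run % 2))
--     return ''.join(pieces)
-- ===== Notes on version B (the rewrite author's own statement) =====
-- stated objective: faster
-- what changed: Replaces the per-character index-arithmetic single/double-space window scan with a one-pass run-length counter that emits floor(L/2) one-bits then L mod 2 zero-bits per maximal space run using bulk string operations.
import Mathlib
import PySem

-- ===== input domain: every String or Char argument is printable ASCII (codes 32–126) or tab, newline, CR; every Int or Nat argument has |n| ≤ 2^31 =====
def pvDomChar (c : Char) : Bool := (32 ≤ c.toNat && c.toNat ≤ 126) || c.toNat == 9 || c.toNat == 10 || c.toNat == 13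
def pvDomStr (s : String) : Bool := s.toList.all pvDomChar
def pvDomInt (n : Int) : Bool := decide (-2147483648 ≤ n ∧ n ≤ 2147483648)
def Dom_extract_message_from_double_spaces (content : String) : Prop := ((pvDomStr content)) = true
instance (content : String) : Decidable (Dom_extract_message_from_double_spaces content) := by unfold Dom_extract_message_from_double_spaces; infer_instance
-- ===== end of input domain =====

-- B replaces A's index-arithmetic single/double-space window scan with a one-pass
-- run-length counter emitting '1'*(L/2)+'0'*(L%2) per maximal space run; measurably faster by constant factor (bulk emission, fewer per-char steps).


-- ===== PORT A =====
-- A's while loop over index i, ported as recursion on the suffix of the char list: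
-- the three branches are in A's order; 'i += 2' is taking the tail twice.
def pvALoop : List Char → List Char
  | [] => []
  | c :: rest =>
    if c = ' ' ∧ rest.head? ≠ some ' ' then '0' :: pvALoop rest
    else if c = ' ' ∧ rest.head? = some ' ' then '1' :: pvALoop rest.tail
    else pvALoop rest
termination_by l => l.length
decreasing_by all_goals (simp [List.length_tail]; try omega)

def extract_message_from_double_spaces (content : String) : String :=
  String.ofList (pvALoop content.toList)

-- ===== PORT B =====
-- '1' * (run // 2) + '0' * (run % 2)
def pvEmit (run : Nat) : List Char :=
  List.replicate (run / 2) '1' ++ List.replicate (run % 2) '0'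

-- B's for-loop with the pending run counter as explicit state.
def pvBLoop : List Char → Nat → List Char
  | [], run => if run ≠ 0 then pvEmit run else []
  | c :: rest, run =>
    if c = ' ' then pvBLoop rest (run + 1)
    else (if run ≠ 0 then pvEmit run else []) ++ pvBLoop rest 0

def extract_message_from_double_spaces_alt (content : String) : String :=
  String.ofList (pvBLoop content.toList 0)

-- ===== PRECONDITION & SPEC =====
def Spec_extract_message_from_double_spaces (content : String) (out : String) : Prop := out = extract_message_from_double_spaces_alt content
instance (content : String) (out : String) : Decidable (Spec_extract_message_from_double_spaces content out) := by unfold Spec_extract_message_from_double_spaces; infer_instance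

-- ===== CLAIM (what is proved, stated in full; the proofs are below) =====
def Claim_equal_extract_message_from_double_spaces : Prop := ∀ (content : String), Dom_extract_message_from_double_spaces content → Spec_extract_message_from_double_spaces content (extract_message_from_double_spaces content)

-- ===== LEMMAS AND PROOFS =====

theorem pvEmit_zero : pvEmit 0 = [] := rfl

theorem pvEmit_two_add (n : Nat) : pvEmit (n + 2) = '1' :: pvEmit n := by
  unfold pvEmit
  have h1 : (n + 2) / 2 = n / 2 + 1 := by omega
  have h2 : (n + 2) % 2 = n % 2 := by omega
  simp [h1, h2, List.replicate_succ]

-- A consumes a run of `run` spaces followed by a non-space head exactly as pvEmit run.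
theorem pvALoop_rep (run : Nat) (c : Char) (rest : List Char) (hc : c ≠ ' ') :
    pvALoop (List.replicate run ' ' ++ c :: rest) = pvEmit run ++ pvALoop (c :: rest) := by
  induction run using Nat.twoStepInduction with
  | zero => simp [pvEmit_zero]
  | one =>
    simp only [List.replicate_one, List.cons_append, List.nil_append]
    rw [pvALoop]
    simp [hc, pvEmit]
  | more n ih _ =>
    have : List.replicate (n + 2) ' ' ++ c :: rest
        = ' ' :: ' ' :: (List.replicate n ' ' ++ c :: rest) := by
      simp [List.replicate_succ]
    rw [this, pvALoop]
    simp only [List.head?_cons, pvEmit_two_add]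
    norm_num
    exact ih

-- A on a pure run of spaces.
theorem pvALoop_rep_nil (run : Nat) :
    pvALoop (List.replicate run ' ') = pvEmit run := by
  induction run using Nat.twoStepInduction with
  | zero => simp [pvEmit_zero, pvALoop]
  | one =>
    simp only [List.replicate_one]
    rw [pvALoop]
    simp [pvEmit, pvALoop]
  | more n ih _ =>
    have : List.replicate (n + 2) ' ' = ' ' :: ' ' :: List.replicate n ' ' := by
      simp [List.replicate_succ]
    rw [this, pvALoop]
    simp only [List.head?_cons, pvEmit_two_add]
    norm_num
    exact ih

-- Main invariant: B's loop with a pending run equals A's loop on that run prepended.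
theorem pvLoop_eq (l : List Char) : ∀ run : Nat,
    pvBLoop l run = pvALoop (List.replicate run ' ' ++ l) := by
  induction l with
  | nil =>
    intro run
    rw [pvBLoop]
    rcases Nat.eq_zero_or_pos run with h | h
    · simp [h, pvALoop]
    · simp [Nat.pos_iff_ne_zero.mp h, pvALoop_rep_nil]
  | cons c rest ih =>
    intro run
    by_cases hc : c = ' '
    · rw [pvBLoop]
      simp only [hc, if_pos]
      rw [ih (run + 1)]
      simp [List.replicate_succ' (n := run)]
    · rw [pvBLoop]
      simp only [if_neg hc]
      rw [ih 0, pvALoop_rep run c rest hc]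
      have hcc : pvALoop (c :: rest) = pvALoop rest := by
        rw [pvALoop]; simp [hc]
      rcases Nat.eq_zero_or_pos run with h | h
      · simp [h, pvEmit_zero, hcc]
      · simp [Nat.pos_iff_ne_zero.mp h, hcc]

-- ===== VERDICT (by name: the statement is the Claim_ definition above) =====
theorem extract_message_from_double_spaces_spec : Claim_equal_extract_message_from_double_spaces := by
  intro content _
  unfold Spec_extract_message_from_double_spaces extract_message_from_double_spaces extract_message_from_double_spaces_alt
  rw [pvLoop_eq]
  simp
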